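-- pv_equiv track=rewrite | github.com/Oren-Dubin1/Thesis-percolation | k222_k5_percolation_by_chat.py | all_pair_partitions_6
-- ===== SOURCE A (Python) =====
-- from typing import Dict, Iterable, List, Optional, Set, Tuple
--
-- def all_pair_partitions_6(V6: Tuple[int, ...]) -> Iterable[Tuple[Tuple[int, int], Tuple[int, int], Tuple[int, int]]]:
--     """
--     All partitions of 6 vertices into 3 unordered pairs (canonical generation).
--     """
--     v = list(V6)
--     v0 = v[0]
--     for i in range(1, 6):
--         p1 = tuple(sorted((v0, v[i])))
--         rest = [v[j] for j in range(1, 6) if j != i]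
--         r0 = rest[0]
--         for j in range(1, 4):
--             p2 = tuple(sorted((r0, rest[j])))
--             r = [rest[k] for k in range(1, 4) if k != j]  # two verts
--             p3 = tuple(sorted((r[0], r[1])))
--             # canonical order of pairs to avoid duplicates from swapping B,C
--             pairs = tuple(sorted((p1, p2, p3)))
--             yield pairs
-- ===== SOURCE B (Python) =====
-- def all_pair_partitions_6(V6):
--     """All partitions of 6 vertices into 3 unordered pairs, via recursive matching."""
--     def match(rest):
--         if not rest:
--             yield ()
--             return
--         pivot = rest[0]
--         for i in range(1, len(rest)):
--             pair = tuple(sorted((pivot, rest[i])))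
--             for sub in match(rest[1:i] + rest[i + 1:]):
--                 yield (pair,) + sub
--     a, b, c, d, e, f = V6[:6]  # exactly six vertices
--     for m in match([a, b, c, d, e, f]):
--         yield tuple(sorted(m))
-- ===== Notes on version B (the rewrite author's own statement) =====
-- stated objective: alternative
-- what changed: Replaces A's two hard-coded index loops with list-comprehension rebuilds by a recursive perfect-matching enumerator over the remaining vertices (pivot + later partner, recurse on the rest), sorting each full matching once at the end.
import Mathlib
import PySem

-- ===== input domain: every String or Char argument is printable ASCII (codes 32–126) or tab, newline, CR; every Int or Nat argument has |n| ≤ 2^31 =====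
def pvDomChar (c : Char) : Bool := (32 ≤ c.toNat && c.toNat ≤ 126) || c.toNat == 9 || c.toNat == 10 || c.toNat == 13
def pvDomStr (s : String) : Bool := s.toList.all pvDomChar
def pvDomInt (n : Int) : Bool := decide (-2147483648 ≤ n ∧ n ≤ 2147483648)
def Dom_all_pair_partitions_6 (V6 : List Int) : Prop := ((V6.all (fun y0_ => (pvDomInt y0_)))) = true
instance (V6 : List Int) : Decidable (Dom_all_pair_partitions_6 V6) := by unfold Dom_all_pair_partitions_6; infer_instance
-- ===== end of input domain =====

-- B replaces A's two hard-coded index loops by a recursive perfect-matching enumerator (alternative decomposition, same cost).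

-- shared helper: tuple(sorted((a, b))) on two ints
def pySortPair (a b : Int) : Int × Int := if a ≤ b then (a, b) else (b, a)

-- Python's `<=` on int pairs (lexicographic)
def pairLE (p q : Int × Int) : Bool := p.1 < q.1 || (p.1 == q.1 && p.2 ≤ q.2)

-- shared helper: tuple(sorted((p, q, r))) on three int pairs (stable insertion sort on 3 elements)
def pySort3 (p q r : Int × Int) : (Int × Int) × (Int × Int) × (Int × Int) :=
  let s := if pairLE p q then (p, q) else (q, p)
  if pairLE s.2 r then (s.1, s.2, r) else if pairLE s.1 r then (s.1, r, s.2) else (r, s.1, s.2)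

-- ===== PORT A =====
-- v[…] ported with pyGetD (all indices are in range under Pre_, which requires length ≥ 6)
def all_pair_partitions_6 (V6 : List Int) : List ((Int × Int) × (Int × Int) × (Int × Int)) :=
  let v := V6
  let v0 := PySem.List.pyGetD v 0 0
  (PySem.List.pyRange 1 6 1).flatMap (fun i =>
    let p1 := pySortPair v0 (PySem.List.pyGetD v i 0)
    let rest := ((PySem.List.pyRange 1 6 1).filter (fun j => decide (j ≠ i))).map
      (fun j => PySem.List.pyGetD v j 0)
    let r0 := PySem.List.pyGetD rest 0 0
    (PySem.List.pyRange 1 4 1).map (fun j =>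
      let p2 := pySortPair r0 (PySem.List.pyGetD rest j 0)
      let r := ((PySem.List.pyRange 1 4 1).filter (fun k => decide (k ≠ j))).map
        (fun k => PySem.List.pyGetD rest k 0)
      let p3 := pySortPair (PySem.List.pyGetD r 0 0) (PySem.List.pyGetD r 1 0)
      pySort3 p1 p2 p3))

-- ===== PORT B =====
-- recursive matching enumerator of Source B; fuel = initial list length makes the recursion structural
-- (the 0/cons fuel case is unreachable when fuel ≥ length, as in every call here)
def bMatch (fuel : Nat) (rest : List Int) : List (List (Int × Int)) :=
  match fuel, rest with
  | _, [] => [[]]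
  | 0, _ :: _ => []
  | Nat.succ f, pivot :: rest' =>
    (List.range rest'.length).flatMap (fun k =>
      (bMatch f (rest'.take k ++ rest'.drop (k + 1))).map
        (fun sub => pySortPair pivot (rest'.getD k 0) :: sub))

-- tuple(sorted(m)) for a full matching m (always 3 pairs on the inputs Pre_ admits)
def sortMatching : List (Int × Int) → (Int × Int) × (Int × Int) × (Int × Int)
  | [p, q, r] => pySort3 p q r
  | _ => ((0, 0), (0, 0), (0, 0))

-- 'a, b, c, d, e, f = V6[:6]' raises ValueError when fewer than six vertices; that case is outside Pre_
def all_pair_partitions_6_alt (V6 : List Int) : List ((Int × Int) × (Int × Int) × (Int × Int)) :=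
  match V6.take 6 with
  | [a, b, c, d, e, f] => (bMatch 6 [a, b, c, d, e, f]).map sortMatching
  | _ => []

-- ===== PRECONDITION & SPEC =====
-- Pre_ excludes exactly the inputs with fewer than 6 vertices, on which A raises IndexError.
def Pre_all_pair_partitions_6 (V6 : List Int) : Prop := 6 ≤ V6.length
instance (V6 : List Int) : Decidable (Pre_all_pair_partitions_6 V6) := by
  unfold Pre_all_pair_partitions_6; infer_instance

def pvWitness_all_pair_partitions_6 : List Int := [1, 2, 3, 4, 5, 6]

def Spec_all_pair_partitions_6 (V6 : List Int) (out : List ((Int × Int) × (Int × Int) × (Int × Int))) : Prop := out = all_pair_partitions_6_alt V6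
instance (V6 : List Int) (out : List ((Int × Int) × (Int × Int) × (Int × Int))) : Decidable (Spec_all_pair_partitions_6 V6 out) := by unfold Spec_all_pair_partitions_6; infer_instance

-- ===== CLAIM (what is proved, stated in full; the proofs are below) =====
def Claim_equal_all_pair_partitions_6 : Prop := ∀ (V6 : List Int), Dom_all_pair_partitions_6 V6 → Pre_all_pair_partitions_6 V6 → Spec_all_pair_partitions_6 V6 (all_pair_partitions_6 V6)

-- ===== LEMMAS AND PROOFS =====

-- ===== VERDICT (by name: the statement is the Claim_ definition above) =====
theorem all_pair_partitions_6_spec : Claim_equal_all_pair_partitions_6 := by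
  intro V6 _ pre
  unfold Spec_all_pair_partitions_6
  rcases V6 with _ | ⟨a, _ | ⟨b, _ | ⟨c, _ | ⟨d, _ | ⟨e, _ | ⟨f, t⟩⟩⟩⟩⟩⟩ <;>
    simp only [Pre_all_pair_partitions_6, List.length_nil, List.length_cons] at pre <;>
    try omega
  have h6 : PySem.List.pyRange 1 6 1 = [1, 2, 3, 4, 5] := rfl
  have h4 : PySem.List.pyRange 1 4 1 = [1, 2, 3] := rfl
  simp [all_pair_partitions_6, all_pair_partitions_6_alt, bMatch, sortMatching, h6, h4,
    PySem.List.pyGetD_ofNat', List.getD, List.range_succ]
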